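/-
  jsmn_d.bin: **`jsmn_parse_string` computes `Jsmn.parseString`** (`str_spec : AllocSpec binD n → FillSpec binD n → StrSpec binD n`).
  The regions (StrEnds, StrHead, StrEsc, StrHex, StrTok, StrQuote) composed along the model: the hex loop by induction on `hexScan`'s count, the
  outer loop with `Reach.loopOn` on `strScan`'s fuel.
-/
import Prog.Jsmn.D.StrEnds
import Prog.Jsmn.D.StrHex
import Prog.Jsmn.D.StrQuote

namespace X86
namespace J6
namespace D
namespace Str
open X86.User (CodeAt RegsKept Span FlagsOK Layout toNat_add_ofNat toNat_ofNat_lt' add_ofNat_add)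
open Jsmn JsmnDBytes

set_option linter.unusedVariables false
set_option linter.unusedSimpArgs false

variable {c : SCtx} {n : User.Layout} {v0 : User.State}

/-- The hex loop from 1001A8H with `j` digits to go: what `hexScan` says — JSMN_ERROR_INVAL, or `pos--` done at 1001F2H. -/
theorem hex_loop (he : Entry c n v0) : ∀ (j i h : Nat) (v : User.State), AtHex c n v0 v i h → i + j = 4 →
    Reach n v (fun v' => match hexScan c.js j h with
      | none => AtRet c n v0 v' JSMN_ERROR_INVAL c.p c.toks
      | some h' => At c n v0 v' 0x1001f2 (u32 ((h' : Int) - 1)))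
  | 0, i, h, v, ha, hij => by
    simp only [hexScan]
    exact hex_exit he ha (by omega) (Or.inl (by omega))
  | j + 1, i, h, v, ha, hij => by
    simp only [hexScan]
    by_cases hh : h < c.js.length
    · refine Reach.trans (hex_body he ha (by omega) hh) ?_
      intro v1 h1
      rcases h1 with ⟨hm, h1⟩ | ⟨hm, hx, h1⟩ | ⟨hm, hx, h1⟩
      · rw [hm]; exact Reach.done h1
      · rw [hm, hx]; exact hex_loop he j (i + 1) _ v1 h1 (by omega)
      · rw [hm, hx]; exact Reach.done h1
    · rw [more_false_len (Nat.le_of_not_lt hh)]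
      exact hex_exit he ha (by omega) (Or.inr (Nat.le_of_not_lt hh))

/-- Where the outer loop ends, by what `strScan` says. -/
def ScanEnd (c : SCtx) (n : User.Layout) (v0 v : User.State) : StrScan → Prop
  | .quote q => At c n v0 v 0x10014e q
  | .bad => AtRet c n v0 v JSMN_ERROR_INVAL c.p c.toks
  | .eoi => AtRet c n v0 v JSMN_ERROR_PART c.p c.toks

/-- The invariant at the head of the outer loop (1001F9H): `strScan` from the position in memory, with `k` units of fuel, gives `res`. -/
def HeadInv (c : SCtx) (n : User.Layout) (v0 : User.State) (res : StrScan) (k : Nat) (v : User.State) : Prop :=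
  ∃ q, At c n v0 v 0x1001f9 q ∧ strScan c.js k q = some res

/-- One trip round the outer loop. -/
theorem outer_body (he : Entry c n v0) (res : StrScan) (k : Nat) (v : User.State) (hi : HeadInv c n v0 res k v) :
    Reach n v (fun v' => ScanEnd c n v0 v' res ∨ ∃ k', k' < k ∧ HeadInv c n v0 res k' v') := by
  obtain ⟨q, ha, hs⟩ := hi
  cases k with
  | zero => simp [strScan] at hs
  | succ k =>
    simp only [strScan] at hs
    have back : ∀ q' v', At c n v0 v' 0x1001f2 q' → strScan c.js k (u32 ((q' : Int) + 1)) = some res →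
        Reach n v' (fun v'' => ScanEnd c n v0 v'' res ∨ ∃ k', k' < k + 1 ∧ HeadInv c n v0 res k' v'') := fun q' v' h1 h2 =>
      (next he h1).mono fun v'' h3 => Or.inr ⟨k, Nat.lt_succ_self k, _, h3, h2⟩
    by_cases hq : q < c.js.length
    · refine Reach.trans (head he ha hq) ?_
      intro v1 h1
      rcases h1 with ⟨hm, h1⟩ | ⟨hm, hc, h1⟩ | ⟨hm, hc, hn, h1⟩ | ⟨hm, hc, hl, h1⟩
      · rw [hm] at hs; cases hs; exact Reach.done (Or.inl h1)
      · rw [hm, hc] at hs; cases hs; exact Reach.done (Or.inl h1)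
      · -- an ordinary character
        have e1 : (charAt c.js q == 34) = false := by simp [hc]
        have e2 : (charAt c.js q == 92 && decide (u32 ((q : Int) + 1) < c.js.length)) = false := by
          cases h : (charAt c.js q == 92 && decide (u32 ((q : Int) + 1) < c.js.length)) with
          | false => rfl
          | true => simp at h; exact absurd h hn
        simp [hm, e1, e2] at hs
        exact back q v1 h1 hs
      · -- a backslash
        have e1 : (charAt c.js q == 34) = false := by rw [hc]; rfl
        have e2 : (charAt c.js q == 92 && decide (u32 ((q : Int) + 1) < c.js.length)) = true := by simp [hc, hl]
        simp only [hm, e1, e2, if_true, Bool.false_eq_true, if_false] at hs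
        refine Reach.trans (esc he h1 hl) ?_
        intro v2 h2
        rcases h2 with ⟨hx, h2⟩ | ⟨hx, hu, h2⟩ | ⟨hx, hu, h2⟩
        · simp only [hx, if_true] at hs
          exact back _ v2 h2 hs
        · have e3 : (charAt c.js (u32 ((q : Int) + 1)) == 117) = true := by rw [hu]; rfl
          simp only [hx, e3, if_true, Bool.false_eq_true, if_false] at hs
          refine Reach.trans (hex_loop he 4 0 _ v2 h2 rfl) ?_
          intro v3 h3
          cases hh : hexScan c.js 4 (u32 ((u32 ((q : Int) + 1) : Int) + 1)) with
          | none => rw [hh] at hs h3; cases hs; exact Reach.done (Or.inl h3)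
          | some h' => rw [hh] at hs h3; exact back _ v3 h3 hs
        · have e3 : (charAt c.js (u32 ((q : Int) + 1)) == 117) = false := by simp [hu]
          simp only [hx, e3, if_true, Bool.false_eq_true, if_false] at hs
          cases hs; exact Reach.done (Or.inl h2)
    · have hm := more_false_len (Nat.le_of_not_lt hq)
      rw [hm] at hs; cases hs
      exact (head_end he ha (Nat.le_of_not_lt hq)).mono fun v' h => Or.inl h

/-- The whole function, for the constants `c` of one call. -/
theorem str_reach (halloc : AllocSpec binD n) (hfill : FillSpec binD n) (he : Entry c n v0) {fuel : Nat} {r : Int} {p' : Parser}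
    {toks' : Option Tokens} (hm : parseString Config.default c.js fuel c.p c.toks c.numTokens = some (r, p', toks')) :
    Reach n v0 (ScanPost binD binD.useStr v0 c.ret c.pa c.tb c.numTokens c.toks r p' toks') := by
  simp only [parseString] at hm
  refine Reach.trans (prologue he) ?_
  intro v1 h1
  cases hscan : strScan c.js fuel (u32 ((c.p.pos : Int) + 1)) with
  | none => rw [hscan] at hm; exact absurd hm (by simp)
  | some res =>
    rw [hscan] at hm
    refine Reach.trans (Reach.loopOn (Inv := HeadInv c n v0 res) (Post := fun v => ScanEnd c n v0 v res) (outer_body he res) fuel v1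
      ⟨_, h1, hscan⟩) ?_
    intro v2 h2
    cases res with
    | bad => simp only at hm; cases hm; exact epilogue he h2
    | eoi => simp only at hm; cases hm; exact epilogue he h2
    | quote q =>
      simp only at hm
      obtain hs | ⟨ts, hs⟩ : c.toks = none ∨ ∃ ts, c.toks = some ts := by cases c.toks <;> simp
      · rw [hs] at hm; simp only at hm; cases hm
        exact Reach.trans (quote_count he h2 hs) fun v3 h3 => epilogue he h3
      · rw [hs] at hm; simp only at hm
        refine Reach.trans (quote_tok halloc hfill he h2 hs) ?_
        intro v3 h3
        cases hall : allocToken Config.default { c.p with pos := q } ts c.numTokens with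
        | none => rw [hall] at hm h3; simp only at hm h3; cases hm; exact epilogue he h3
        | some x =>
          obtain ⟨i, pp, ts'⟩ := x
          rw [hall] at hm h3; simp only [links_default, Bool.false_eq_true, if_false] at hm h3; cases hm
          exact epilogue he h3

end Str

set_option linter.unusedVariables false in
set_option linter.unusedSimpArgs false
/-- **jsmn_parse_string of jsmn_d.bin computes `Jsmn.parseString`.** -/
theorem str_spec {n : User.Layout} (halloc : AllocSpec binD n) (hfill : FillSpec binD n) : StrSpec binD n :=
  fun v0 ret pa jsA tb js numTokens p toks fuel r p' toks' hp hr8 hm =>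
    Str.str_reach (c := ⟨ret, pa, jsA, tb, js, numTokens, p, toks⟩) halloc hfill ⟨hp, hr8⟩ hm

end D
end J6
end X86
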